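-- pv_equiv track=rewrite | github.com/pypi-data/pypi-mirror-162 | packages/cellpylib3d/cellpylib3d-1.0.2.tar.gz/cellpylib3d-1.0.2/cellpylib3d/ca_functionsParallel.py | _get_neighbourhood_indices
-- ===== SOURCE A (Python) =====
-- def _get_neighbourhood_indices(rows, cols, layers, r):
--     """
--     Returns a dictionary mapping the coordinates of a cell in a 3D CA to its neighbourhood indices.
--
--     :param layers: the number of layers in the 3D CA
--
--     :param rows: the number of rows in the 3D CA
--
--     :param cols: the number of columns in the 3D CA
--
--     :param r: the radius of the neighbourhood
--
--     :return: a dictionary, where the key is a 3-tuple, (row, col, layer), and the value is a 3-tuple, (row_indices, col_indices, layer_indices)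
--
--     """
--
--     indices = {}
--
--     for row in range(rows):
--         for col in range(cols):
--             for layer in range(layers):
--
--                 layer_indices = range(0, layers)    # all layers
--                 layer_indices = [i - layers if i >
--                                  (layers - 1) else i for i in layer_indices]
--
--                 row_indices = range(row - r, row + r + 1)   # rows within radius
--                 row_indices = [i - rows if i >
--                                (rows - 1) else i for i in row_indices]
--
--                 col_indices = range(col - r, col + r + 1)   # columns within radius
--                 col_indices = [i - cols if i >
--                                (cols - 1) else i for i in col_indices]
--
--                 indices[(row, col, layer)] = (
--                     row_indices, col_indices, layer_indices)
--
--     return indices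
-- ===== SOURCE B (Python) =====
-- def _get_neighbourhood_indices(rows, cols, layers, r):
--     # Precompute the wrapped index list once per row and per column, and the
--     # (constant) layer list once, then assemble the dict from those.
--     if rows <= 0 or cols <= 0 or layers <= 0:
--         return {}
--
--     def wrap(x, n):
--         return [i - n if i >= n else i for i in range(x - r, x + r + 1)]
--
--     layer_indices = list(range(layers))
--     row_lists = [wrap(row, rows) for row in range(rows)]
--     col_lists = [wrap(col, cols) for col in range(cols)]
--     return {(row, col, layer): (ri, ci, layer_indices)
--             for row, ri in zip(range(rows), row_lists)
--             for col, ci in zip(range(cols), col_lists)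
--             for layer in range(layers)}
-- ===== Notes on version B (the rewrite author's own statement) =====
-- stated objective: alternative
-- what changed: Per-row and per-column wrapped index lists and the constant layer list are computed once (with an early empty-dict return when a dimension is <= 0) and the dict is assembled from those precomputed lists, instead of recomputing all three lists inside the innermost of the triple loop; the asymptotic saving is in list construction only, and building the output dict dominates, so no speed claim is made.
import Mathlib
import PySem

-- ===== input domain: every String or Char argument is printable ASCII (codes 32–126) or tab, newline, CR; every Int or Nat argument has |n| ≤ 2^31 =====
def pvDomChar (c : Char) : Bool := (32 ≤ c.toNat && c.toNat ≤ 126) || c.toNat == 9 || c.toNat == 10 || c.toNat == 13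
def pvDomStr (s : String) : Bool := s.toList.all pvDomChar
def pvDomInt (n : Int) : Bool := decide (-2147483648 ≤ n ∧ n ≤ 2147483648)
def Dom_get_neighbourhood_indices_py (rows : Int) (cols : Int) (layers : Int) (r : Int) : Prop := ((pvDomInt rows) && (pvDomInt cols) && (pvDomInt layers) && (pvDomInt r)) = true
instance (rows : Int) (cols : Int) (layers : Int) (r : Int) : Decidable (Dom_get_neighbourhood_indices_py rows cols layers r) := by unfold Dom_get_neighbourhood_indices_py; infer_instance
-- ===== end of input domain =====

-- B precomputes the wrapped index list once per row / per column and the constant layer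
-- list once, then assembles the dict from those instead of recomputing them per cell.

-- ===== PORT A =====
def get_neighbourhood_indices_py (rows : Int) (cols : Int) (layers : Int) (r : Int) : List (List Int × List (List Int)) :=
  ((PySem.List.pyRange 0 rows 1).foldl (fun indices row =>
    (PySem.List.pyRange 0 cols 1).foldl (fun indices col =>
      (PySem.List.pyRange 0 layers 1).foldl (fun indices layer =>
        let layer_indices := (PySem.List.pyRange 0 layers 1).map
          (fun i => if i > layers - 1 then i - layers else i)
        let row_indices := (PySem.List.pyRange (row - r) (row + r + 1) 1).map
          (fun i => if i > rows - 1 then i - rows else i)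
        let col_indices := (PySem.List.pyRange (col - r) (col + r + 1) 1).map
          (fun i => if i > cols - 1 then i - cols else i)
        indices.insert [row, col, layer] [row_indices, col_indices, layer_indices])
        indices)
      indices)
    (PySem.Dict.empty : PySem.Dict (List Int) (List (List Int)))).items

-- ===== PORT B =====
-- wrap(x, n) from Source B
def pvWrap (r : Int) (n : Int) (x : Int) : List Int :=
  (PySem.List.pyRange (x - r) (x + r + 1) 1).map (fun i => if i ≥ n then i - n else i)

def get_neighbourhood_indices_py_alt (rows : Int) (cols : Int) (layers : Int) (r : Int) : List (List Int × List (List Int)) :=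
  if rows ≤ 0 ∨ cols ≤ 0 ∨ layers ≤ 0 then [] else
  let layer_indices := PySem.List.pyRange 0 layers 1
  let row_lists := (PySem.List.pyRange 0 rows 1).map (fun row => pvWrap r rows row)
  let col_lists := (PySem.List.pyRange 0 cols 1).map (fun col => pvWrap r cols col)
  ((PySem.List.pyRange 0 rows 1).zip row_lists).flatMap (fun p =>
    ((PySem.List.pyRange 0 cols 1).zip col_lists).flatMap (fun q =>
      (PySem.List.pyRange 0 layers 1).map (fun layer =>
        ([p.1, q.1, layer], [p.2, q.2, layer_indices]))))

-- ===== PRECONDITION & SPEC =====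
def Spec_get_neighbourhood_indices_py (rows : Int) (cols : Int) (layers : Int) (r : Int) (out : List (List Int × List (List Int))) : Prop := out = get_neighbourhood_indices_py_alt rows cols layers r
instance (rows : Int) (cols : Int) (layers : Int) (r : Int) (out : List (List Int × List (List Int))) : Decidable (Spec_get_neighbourhood_indices_py rows cols layers r out) := by unfold Spec_get_neighbourhood_indices_py; infer_instance

-- ===== CLAIM (what is proved, stated in full; the proofs are below) =====
def Claim_equal_get_neighbourhood_indices_py : Prop := ∀ (rows : Int) (cols : Int) (layers : Int) (r : Int), Dom_get_neighbourhood_indices_py rows cols layers r → Spec_get_neighbourhood_indices_py rows cols layers r (get_neighbourhood_indices_py rows cols layers r)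

-- ===== LEMMAS AND PROOFS =====

-- Middle loop of A (fixed row): inserting over fresh distinct (col, layer) keys appends.
lemma pv_fold2_items (row : Int) (v : Int → Int → List (List Int))
    (cs ls : List Int) (hcs : cs.Nodup) (hls : ls.Nodup)
    (d : PySem.Dict (List Int) (List (List Int)))
    (hd : ∀ c ∈ cs, ∀ l : Int, [row, c, l] ∉ d.keys) :
    (cs.foldl (fun acc col =>
        ls.foldl (fun acc layer => acc.insert [row, col, layer] (v col layer)) acc) d).items
      = d.items ++ cs.flatMap (fun col => ls.map (fun layer => ([row, col, layer], v col layer))) := by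
  induction cs generalizing d with
  | nil => simp
  | cons c cs ih =>
    simp only [List.foldl_cons, List.flatMap_cons]
    have hfresh : ∀ l ∈ ls, d.contains [row, c, l] = false := by
      intro l _
      have := hd c (by simp) l
      rw [← Bool.not_eq_true, PySem.Dict.contains_iff_mem_keys]
      exact this
    have hinj : (ls.map (fun l => [row, c, l])).Nodup := by
      refine hls.map ?_
      intro a b h; simpa using h
    have hstep := PySem.Dict.items_foldl_insert_fresh
      (l := ls) (k := fun l => [row, c, l]) (v := fun l => v c l) (d := d) hfresh hinj
    rw [ih (List.Nodup.of_cons hcs) _ ?_, hstep]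
    · simp [List.append_assoc]
    · intro c' hc' l
      have hkeys : (ls.foldl (fun acc layer => acc.insert [row, c, layer] (v c layer)) d).keys
          = d.keys ++ ls.map (fun l => [row, c, l]) := by
        simp only [PySem.Dict.keys, hstep, List.map_append, List.map_map]
        rfl
      rw [hkeys]
      simp only [List.mem_append, List.mem_map, not_or]
      constructor
      · exact hd c' (by simp [hc']) l
      · rintro ⟨l', _, h⟩
        simp only [List.cons.injEq, and_true] at h
        exact (List.nodup_cons.mp hcs).1 (by rw [h.2.1]; exact hc')

-- Outer loop of A: same, over rows.
lemma pv_fold3_items (v : Int → Int → Int → List (List Int))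
    (rs cs ls : List Int) (hrs : rs.Nodup) (hcs : cs.Nodup) (hls : ls.Nodup) :
    (rs.foldl (fun acc row =>
      cs.foldl (fun acc col =>
        ls.foldl (fun acc layer => acc.insert [row, col, layer] (v row col layer)) acc) acc)
      (PySem.Dict.empty : PySem.Dict (List Int) (List (List Int)))).items
      = rs.flatMap (fun row => cs.flatMap (fun col =>
          ls.map (fun layer => ([row, col, layer], v row col layer)))) := by
  suffices h : ∀ d : PySem.Dict (List Int) (List (List Int)),
      (∀ row ∈ rs, ∀ c l : Int, [row, c, l] ∉ d.keys) →
      (rs.foldl (fun acc row =>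
        cs.foldl (fun acc col =>
          ls.foldl (fun acc layer => acc.insert [row, col, layer] (v row col layer)) acc) acc)
        d).items
      = d.items ++ rs.flatMap (fun row => cs.flatMap (fun col =>
          ls.map (fun layer => ([row, col, layer], v row col layer)))) by
    have := h PySem.Dict.empty (by intro row _ c l; simp [PySem.Dict.keys_empty])
    simpa [PySem.Dict.items] using this
  induction rs with
  | nil => intro d _; simp
  | cons a rs ih =>
    intro d hd
    simp only [List.foldl_cons, List.flatMap_cons]
    have hstep := pv_fold2_items a (fun c l => v a c l) cs ls hcs hls d
      (fun c _ l => hd a (by simp) c l)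
    have hkeys : (cs.foldl (fun acc col =>
        ls.foldl (fun acc layer => acc.insert [a, col, layer] (v a col layer)) acc) d).keys
        = d.keys ++ cs.flatMap (fun col => ls.map (fun l => [a, col, l])) := by
      simp only [PySem.Dict.keys, hstep, List.map_append, List.map_flatMap, List.map_map]
      rfl
    rw [ih (List.Nodup.of_cons hrs) _ ?_, hstep]
    · simp [List.append_assoc]
    · intro row hrow c l
      rw [hkeys]
      simp only [List.mem_append, List.mem_flatMap, List.mem_map, not_or]
      refine ⟨hd row (by simp [hrow]) c l, ?_⟩
      rintro ⟨c', _, l', _, h⟩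
      simp only [List.cons.injEq, and_true] at h
      exact (List.nodup_cons.mp hrs).1 (by rw [h.1]; exact hrow)

lemma pv_layer_map (layers : Int) :
    (PySem.List.pyRange 0 layers 1).map (fun i => if i > layers - 1 then i - layers else i)
      = PySem.List.pyRange 0 layers 1 := by
  rw [List.map_congr_left (g := id), List.map_id]
  intro i hi
  have := (PySem.List.mem_pyRange_one.mp hi).2
  simp only [id]
  rw [if_neg (by omega)]

lemma pv_wrap_eq (n x r0 : Int) :
    (PySem.List.pyRange (x - r0) (x + r0 + 1) 1).map (fun i => if i > n - 1 then i - n else i)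
      = pvWrap r0 n x := by
  unfold pvWrap
  apply List.map_congr_left
  intro i _
  by_cases h : i ≥ n
  · rw [if_pos (by omega), if_pos h]
  · rw [if_neg (by omega), if_neg h]

lemma pv_zip_map {α β : Type} (xs : List α) (f : α → β) :
    xs.zip (xs.map f) = xs.map (fun x => (x, f x)) := by
  induction xs with
  | nil => rfl
  | cons a xs ih => simp [ih]

lemma pv_range_nil {n : Int} (h : n ≤ 0) : PySem.List.pyRange 0 n 1 = [] := by
  rw [PySem.List.pyRange_one]
  have h0 : (n - 0).toNat = 0 := by omega
  rw [h0]
  rfl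

-- ===== VERDICT (by name: the statement is the Claim_ definition above) =====
theorem get_neighbourhood_indices_py_spec : Claim_equal_get_neighbourhood_indices_py := by
  intro rows cols layers r _
  unfold Spec_get_neighbourhood_indices_py get_neighbourhood_indices_py get_neighbourhood_indices_py_alt
  simp only [pv_layer_map, pv_wrap_eq]
  rw [pv_fold3_items (fun row col _ => [pvWrap r rows row, pvWrap r cols col, PySem.List.pyRange 0 layers 1])
    _ _ _ (PySem.List.nodup_pyRange_one 0 rows) (PySem.List.nodup_pyRange_one 0 cols) (PySem.List.nodup_pyRange_one 0 layers)]
  by_cases h : rows ≤ 0 ∨ cols ≤ 0 ∨ layers ≤ 0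
  · rw [if_pos h]
    rcases h with h | h | h
    · rw [pv_range_nil h]; rfl
    · rw [pv_range_nil h]; simp
    · rw [pv_range_nil h]; simp
  · rw [if_neg h]
    simp only [pv_zip_map, List.flatMap_map]
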